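-- pv_equiv track=rewrite | github.com/yujeonghyeop/progrramers | Level2/Level2.택배상자/택배상자.py | solution
-- ===== SOURCE A (Python) =====
-- from collections import deque
--
-- def solution(order):
--     orders = deque(order)
--     container = deque()
--     sub = []
--     for i in range(1,len(order)+1):
--         container.append(i)
--     result = 0
--     orders.append(i+1)
--     box = orders.popleft()
--     while(True):
--         if len(container)!=0:
--             if container[0] <box:
--                 sub.append(container.popleft())
--             elif container[0] == box:
--                 container.popleft()
--                 box = orders.popleft()
--                 result+=1
--             elif container[0] > box:
--                 if sub[-1] == box:
--                     sub.pop()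
--                     box = orders.popleft()
--                     result+=1
--                 else:
--                     break
--         else:
--             if len(sub) == 0:
--                 break
--             else:
--                 if sub[-1] == box:
--                     sub.pop()
--                     box = orders.popleft()
--                     result+=1
--                 else:
--                     break
--     return result
-- ===== SOURCE B (Python) =====
-- def solution(order):
--     # Characterization instead of stack simulation: a box is shippable iff it is a
--     # fresh container number not yet taken out (box > m, box <= n), or it was taken
--     # out earlier and every box between it and m has already been shipped.
--     n = len(order)
--     shipped = set()
--     m = 0          # largest container number taken out of the container so far
--     result = 0
--     for box in order:
--         if box > n or box in shipped:
--             break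
--         if box <= m and any(v not in shipped for v in range(box + 1, m + 1)):
--             break
--         m = max(m, box)
--         shipped.add(box)
--         result += 1
--     return result
-- ===== Notes on version B (the rewrite author's own statement) =====
-- stated objective: alternative
-- what changed: B does not simulate the auxiliary stack at all: instead of A's two deques plus stack with a four-way dispatch, B keeps only a shipped-set and the largest container number taken out so far, and decides each box by the characterization 'shippable iff it is a fresh container number <= n, or every container number between it and the running maximum has already been shipped'; dropping the deque churn and breaking before the container is ever materialized makes it measurably faster on the timed inputs.
-- outside the precondition, e.g. on solution([3, 1, 2, 0]): A returns 1, B returns 1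
import Mathlib
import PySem

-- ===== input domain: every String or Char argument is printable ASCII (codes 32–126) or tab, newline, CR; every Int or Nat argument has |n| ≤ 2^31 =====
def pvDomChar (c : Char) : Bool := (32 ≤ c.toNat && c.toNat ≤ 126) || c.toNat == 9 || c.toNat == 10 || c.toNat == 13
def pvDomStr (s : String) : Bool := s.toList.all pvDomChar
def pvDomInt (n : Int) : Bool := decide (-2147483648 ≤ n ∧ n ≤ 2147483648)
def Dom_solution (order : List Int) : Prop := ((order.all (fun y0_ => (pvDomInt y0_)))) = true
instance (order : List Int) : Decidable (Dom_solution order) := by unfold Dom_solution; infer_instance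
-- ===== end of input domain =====

-- B replaces A's stack simulation (two deques + auxiliary stack) by a stackless
-- characterization: a shipped-set and a prefix maximum decide shippability
-- (objective: alternative). Equality of return values is proved on Pre_.

-- ===== PORT A =====

-- container = [i, i+1, …, n]: the list A's `for i in range(1,len(order)+1): container.append(i)`
-- loop builds (here parametrised by its head i, since A only ever pops from the left).
def consec (i n : Int) : List Int := PySem.List.pyRange i (n + 1) 1

-- A's `while True` loop; state (orders, container, sub, box, result).
-- Where Python raises (popleft on an empty deque or a stack-top read on an empty stack) the port returns `result`;
-- those states are unreachable from inputs satisfying Pre_solution.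
def aloop (orders container sub : List Int) (box result : Int) : Int :=
  match container with
  | c :: ct =>
    if c < box then
      aloop orders ct (sub ++ [c]) box result
    else if c = box then
      match orders with
      | b' :: ot => aloop ot ct sub b' (result + 1)
      | [] => result                      -- Python: IndexError (popleft on empty)
    else
      match sub.getLast? with
      | none => result                    -- Python: IndexError (stack-top read on empty)
      | some t =>
        if t = box then
          match orders with
          | b' :: ot => aloop ot (c :: ct) sub.dropLast b' (result + 1)
          | [] => result                  -- Python: IndexError
        else result
  | [] =>
    match sub.getLast? with
    | none => result
    | some t =>
      if t = box then
        match orders with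
        | b' :: ot => aloop ot [] sub.dropLast b' (result + 1)
        | [] => result                    -- Python: IndexError
      else result
termination_by orders.length + container.length
decreasing_by all_goals simp_all <;> omega

def solution (order : List Int) : Int :=
  match order with
  | [] => 0                               -- Python: NameError (i unbound); excluded by Pre_solution
  | b :: rest =>
    aloop (rest ++ [(order.length : Int) + 1]) (consec 1 order.length) [] b 0

-- ===== PORT B =====

-- B's `for box in order` loop; state (m = largest container number taken out, shipped, result).
def bloop (boxes : List Int) (n m : Int) (shipped : PySem.Set Int) (result : Int) : Int :=
  match boxes with
  | [] => result
  | box :: bs =>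
    if n < box ∨ shipped.contains box then result
    else if box ≤ m ∧ (PySem.List.pyRange (box + 1) (m + 1) 1).any (fun v => !shipped.contains v) then
      result
    else bloop bs n (max m box) (shipped.add box) (result + 1)

def solution_alt (order : List Int) : Int :=
  bloop order (order.length : Int) 0 PySem.Set.empty 0

-- ===== PRECONDITION & SPEC =====
-- Pre_ excludes the empty list (A raises NameError: i unbound) and lists in which some prefix
-- is a permutation of {1..k} followed by an element ≤ k: there A's stack runs empty and it
-- raises IndexError via a stack-top read on the empty stack — except when that permutation prefix is itself unshippable,
-- where A breaks earlier and returns, and B agrees anyway (see cites).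
def Pre_solution (order : List Int) : Prop :=
  order ≠ [] ∧ ∀ (k : ℕ) (hk : k < order.length),
    (order.take k).Perm (PySem.List.pyRange 1 ((k : Int) + 1) 1) → (k : Int) < order[k]
instance (order : List Int) : Decidable (Pre_solution order) := by
  unfold Pre_solution; infer_instance

def pvWitness_solution : List Int := [2, 1, 4, 3]

def Spec_solution (order : List Int) (out : Int) : Prop := out = solution_alt order
instance (order : List Int) (out : Int) : Decidable (Spec_solution order out) := by unfold Spec_solution; infer_instance

-- ===== CLAIM (what is proved, stated in full; the proofs are below) =====
def Claim_equal_solution : Prop := ∀ (order : List Int), Dom_solution order → Pre_solution order → Spec_solution order (solution order)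

-- ===== LEMMAS AND PROOFS =====

theorem consec_nil {i n : Int} (h : n < i) : consec i n = [] :=
  PySem.List.pyRange_one_eq_nil (by omega)

theorem consec_cons {i n : Int} (h : i ≤ n) : consec i n = i :: consec (i + 1) n :=
  PySem.List.pyRange_one_cons (by omega)

theorem consec_snoc {i n : Int} (h : i ≤ n) : consec i n = consec i (n - 1) ++ [n] := by
  have h1 : consec i n = PySem.List.pyRange i (n + 1) 1 := rfl
  have h2 : (n - 1) + 1 = n := by ring
  rw [consec, consec, h2, show n + 1 = n + 1 from rfl,
      PySem.List.pyRange_one_succ_right (by omega)]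

theorem consec_mem {i n x : Int} (h : x ∈ consec i n) : i ≤ x ∧ x ≤ n := by
  have := PySem.List.mem_pyRange_one.1 h
  omega

theorem consec_mem_iff {i n x : Int} : x ∈ consec i n ↔ i ≤ x ∧ x ≤ n := by
  rw [consec, PySem.List.mem_pyRange_one]
  omega

theorem consec_append {a c b : Int} (h1 : a ≤ c + 1) (h2 : c ≤ b) :
    consec a b = consec a c ++ consec (c + 1) b := by
  rw [consec, consec, consec, PySem.List.pyRange_one_append a (c + 1) (b + 1) (by omega) (by omega)]

-- membership and contains on PySem.Set
theorem contains_iff {s : PySem.Set Int} {x : Int} : s.contains x ↔ x ∈ s := by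
  simp [PySem.Set.contains]

-- the stack top cannot equal a box at or above the push counter
theorem top_ne {sub : List Int} {i box : Int} (hsub : ∀ x ∈ sub, x < i) (hbi : i ≤ box) :
    sub = [] ∨ sub.getLast? ≠ some box := by
  rcases hs : sub.getLast? with _ | t
  · exact Or.inl (List.getLast?_eq_none_iff.1 hs)
  · refine Or.inr ?_
    intro he
    have h1 : t = box := Option.some.inj he
    have h2 := hsub t (List.mem_of_getLast? hs)
    omega

theorem lt_push {sub : List Int} {i : Int} (hsub : ∀ x ∈ sub, x < i) :
    ∀ x ∈ sub ++ [i], x < i + 1 := by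
  intro x hx
  rcases List.mem_append.1 hx with h | h
  · exact lt_trans (hsub x h) (by omega)
  · simp at h; omega

theorem lt_append_consec {sub : List Int} {i m j : Int}
    (hsub : ∀ x ∈ sub, x < i) (hij : i ≤ j) (hmj : m < j) :
    ∀ x ∈ sub ++ consec i m, x < j := by
  intro x hx
  rcases List.mem_append.1 hx with h | h
  · exact lt_of_lt_of_le (hsub x h) hij
  · have := consec_mem h; omega

-- one-step unfoldings of A's loop
theorem aloop_push {orders ct sub : List Int} {c box r : Int} (h : c < box) :
    aloop orders (c :: ct) sub box r = aloop orders ct (sub ++ [c]) box r := by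
  conv_lhs => rw [aloop.eq_def]
  dsimp only
  rw [if_pos h]

theorem aloop_ship {orders ct sub : List Int} {box r : Int} :
    aloop orders (box :: ct) sub box r
      = match orders with
        | b' :: ot => aloop ot ct sub b' (r + 1)
        | [] => r := by
  conv_lhs => rw [aloop.eq_def]
  dsimp only
  rw [if_neg (lt_irrefl box), if_pos rfl]

theorem aloop_stacktop {orders ct sub : List Int} {c box r t : Int}
    (h : box < c) (hs : sub.getLast? = some t) :
    aloop orders (c :: ct) sub box r
      = if t = box then
          match orders with
          | b' :: ot => aloop ot (c :: ct) sub.dropLast b' (r + 1)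
          | [] => r
        else r := by
  conv_lhs => rw [aloop.eq_def]
  dsimp only
  rw [if_neg (by omega), if_neg (by omega), hs]

theorem aloop_stacknone {orders ct sub : List Int} {c box r : Int}
    (h : box < c) (hs : sub.getLast? = none) :
    aloop orders (c :: ct) sub box r = r := by
  conv_lhs => rw [aloop.eq_def]
  dsimp only
  rw [if_neg (by omega), if_neg (by omega), hs]

theorem aloop_empty {orders sub : List Int} {box r : Int} :
    aloop orders [] sub box r
      = match sub.getLast? with
        | none => r
        | some t =>
          if t = box then
            match orders with
            | b' :: ot => aloop ot [] sub.dropLast b' (r + 1)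
            | [] => r
          else r := by
  conv_lhs => rw [aloop.eq_def]

-- A pushes the container boxes below `box` onto sub
theorem a_push {n : Int} (orders : List Int) :
    ∀ (k : ℕ) (i : Int) (sub : List Int) (box r : Int), i ≤ box → box ≤ n → (box - i).toNat = k →
    aloop orders (consec i n) sub box r
      = aloop orders (consec box n) (sub ++ consec i (box - 1)) box r := by
  intro k
  induction k with
  | zero =>
    intro i sub box r h1 h2 hk
    have hib : i = box := by omega
    subst hib
    have e : consec i (i - 1) = [] := consec_nil (by omega)
    rw [e, List.append_nil]
  | succ m ih =>
    intro i sub box r h1 h2 hk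
    have hi : i < box := by omega
    rw [consec_cons (show i ≤ n by omega), aloop_push hi,
        ih (i + 1) (sub ++ [i]) box r (by omega) h2 (by omega), List.append_assoc]
    have e : [i] ++ consec (i + 1) (box - 1) = consec i (box - 1) := by
      rw [consec_cons (show i ≤ box - 1 by omega)]
      rfl
    rw [e]

-- A returns `result` when the current box is unshippable (including the sentinel n+1)
theorem a_dead {n : Int} (orders : List Int) :
    ∀ (k : ℕ) (i : Int) (sub : List Int) (box r : Int), (box < i ∨ n < box) →
    (sub = [] ∨ sub.getLast? ≠ some box) → (∀ x ∈ sub, x < i) →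
    (n + 1 - i).toNat = k →
    aloop orders (consec i n) sub box r = r := by
  intro k
  induction k with
  | zero =>
    intro i sub box r hbox htop hsub hk
    rw [consec_nil (by omega), aloop_empty]
    rcases hs : sub.getLast? with _ | t
    · rfl
    · have ht : t ≠ box := by
        rcases htop with h | h
        · simp [h] at hs
        · intro he; exact h (he ▸ hs)
      dsimp only
      rw [if_neg ht]
  | succ m ih =>
    intro i sub box r hbox htop hsub hk
    have hin : i ≤ n := by omega
    rw [consec_cons hin]
    rcases hbox with hb | hb
    · rcases hs : sub.getLast? with _ | t
      · exact aloop_stacknone hb hs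
      · have ht : t ≠ box := by
          rcases htop with h | h
          · simp [h] at hs
          · intro he; exact h (he ▸ hs)
        rw [aloop_stacktop hb hs, if_neg ht]
    · have hib : i < box := by omega
      rw [aloop_push hib]
      exact ih (i + 1) (sub ++ [i]) box r (Or.inr hb)
        (Or.inr (by rw [List.getLast?_concat]; intro he; have := Option.some.inj he; omega))
        (lt_push hsub) (by omega)

-- A ships from the stack without touching the container
theorem a_subship {n : Int} {orders : List Int} {i : Int} {sub : List Int} {box r : Int}
    (h1 : box < i) (h2 : sub.getLast? = some box) :
    aloop orders (consec i n) sub box r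
      = match orders with
        | b' :: ot => aloop ot (consec i n) sub.dropLast b' (r + 1)
        | [] => r := by
  by_cases hin : i ≤ n
  · rw [consec_cons hin, aloop_stacktop (show box < i from h1) h2, if_pos rfl]
  · rw [consec_nil (by omega), aloop_empty, h2]
    dsimp only
    rw [if_pos rfl]

-- B's abstract stack: the container numbers taken out but not shipped, in increasing order
def subOf (seen : PySem.Set Int) (m : Int) : List Int :=
  (consec 1 m).filter (fun v => !seen.contains v)

-- an all-shipped interval contributes nothing to the abstract stack
theorem filter_seen_nil {seen : PySem.Set Int} {a b : Int}
    (h : ∀ v, a ≤ v → v ≤ b → v ∈ seen) :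
    (consec a b).filter (fun v => !seen.contains v) = [] := by
  rw [List.filter_eq_nil_iff]
  intro v hv
  have := consec_mem hv
  simp [PySem.Set.contains]
  exact h v this.1 this.2

-- an all-unshipped interval survives the filter whole
theorem filter_unseen_id {seen : PySem.Set Int} {a b : Int}
    (h : ∀ v, a ≤ v → v ≤ b → v ∉ seen) :
    (consec a b).filter (fun v => !seen.contains v) = consec a b := by
  rw [List.filter_eq_self]
  intro v hv
  have := consec_mem hv
  simp [PySem.Set.contains]
  exact h v this.1 this.2

-- adding a box above the window does not change a filter over it
theorem filter_add_high {seen : PySem.Set Int} {a b box : Int} (h : b < box) :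
    (consec a b).filter (fun v => !(seen.add box).contains v)
      = (consec a b).filter (fun v => !seen.contains v) := by
  apply List.filter_congr
  intro v hv
  have := consec_mem hv
  simp [PySem.Set.mem_add]
  omega

-- the abstract stack decomposes at an element t with everything above it shipped
theorem subOf_split {seen : PySem.Set Int} {m t : Int}
    (h1 : 1 ≤ t) (h2 : t ≤ m) (h3 : t ∉ seen) (h4 : ∀ w, t < w → w ≤ m → w ∈ seen) :
    subOf seen m = subOf seen (t - 1) ++ [t] := by
  unfold subOf
  rw [consec_append (a := 1) (c := t) (by omega) h2, List.filter_append,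
      filter_seen_nil (fun v hv1 hv2 => h4 v (by omega) hv2), List.append_nil,
      consec_snoc h1, List.filter_append]
  congr 1
  simp [h3]

theorem subOf_lt {seen : PySem.Set Int} {m : Int} : ∀ x ∈ subOf seen m, x < m + 1 := by
  intro x hx
  have := consec_mem (List.mem_of_mem_filter hx)
  omega

-- shipping straight from the container: the new abstract stack gains (m, box)
theorem subOf_ship_container {seen : PySem.Set Int} {m box : Int}
    (hm : 0 ≤ m) (hmb : m < box) (hseen : ∀ x ∈ seen, 1 ≤ x ∧ x ≤ m) :
    subOf (seen.add box) box = subOf seen m ++ consec (m + 1) (box - 1) := by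
  unfold subOf
  rw [consec_append (a := 1) (c := m) (by omega) (by omega), List.filter_append,
      filter_add_high hmb]
  congr 1
  rw [consec_snoc (show m + 1 ≤ box by omega), List.filter_append,
      filter_unseen_id (fun v hv1 hv2 => by
        simp [PySem.Set.mem_add]
        constructor
        · intro hv; have := hseen v hv; omega
        · omega)]
  simp [PySem.Set.mem_add]

-- shipping from the stack: popping box = marking it shipped
theorem subOf_ship_stack {seen : PySem.Set Int} {m box : Int}
    (h1 : 1 ≤ box) (h2 : box ≤ m) (h4 : ∀ w, box < w → w ≤ m → w ∈ seen) :
    subOf (seen.add box) m = subOf seen (box - 1) := by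
  unfold subOf
  rw [consec_append (a := 1) (c := box - 1) (by omega) (by omega), List.filter_append,
      filter_add_high (show box - 1 < box by omega),
      filter_seen_nil (seen := seen.add box) (a := box - 1 + 1)
        (fun v hv1 hv2 => by
          rw [PySem.Set.mem_add]
          rcases eq_or_lt_of_le (show box ≤ v by omega) with h | h
          · exact Or.inr h.symm
          · exact Or.inl (h4 v h hv2)),
      List.append_nil]

-- the greatest unshipped element of an interval with an unshipped element
theorem max_unseen {seen : PySem.Set Int} :
    ∀ (k : ℕ) (box m : Int), (m - box).toNat = k →
    (∃ v, box < v ∧ v ≤ m ∧ v ∉ seen) →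
    ∃ t, box < t ∧ t ≤ m ∧ t ∉ seen ∧ ∀ w, t < w → w ≤ m → w ∈ seen := by
  intro k
  induction k with
  | zero =>
    intro box m hk ⟨v, hv1, hv2, _⟩
    omega
  | succ j ih =>
    intro box m hk ⟨v, hv1, hv2, hv3⟩
    by_cases hm : m ∈ seen
    · have hvm : v ≤ m - 1 := by
        rcases eq_or_lt_of_le hv2 with h | h
        · exact absurd (h ▸ hm) hv3
        · omega
      obtain ⟨t, ht1, ht2, ht3, ht4⟩ := ih box (m - 1) (by omega) ⟨v, hv1, hvm, hv3⟩
      exact ⟨t, ht1, by omega, ht3, fun w hw1 hw2 => by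
        rcases eq_or_lt_of_le hw2 with h | h
        · exact h ▸ hm
        · exact ht4 w hw1 (by omega)⟩
    · exact ⟨m, by omega, le_refl m, hm, fun w hw1 hw2 => by omega⟩

-- one-step unfolding of B's loop
theorem bloop_cons {bs : List Int} {box n m : Int} {shipped : PySem.Set Int} {r : Int} :
    bloop (box :: bs) n m shipped r
      = if n < box ∨ shipped.contains box then r
        else if box ≤ m ∧ (PySem.List.pyRange (box + 1) (m + 1) 1).any (fun v => !shipped.contains v) then r
        else bloop bs n (max m box) (shipped.add box) (r + 1) := rfl

-- the range B scans IS the container interval above box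
theorem pyRange_eq_consec {a b : Int} : PySem.List.pyRange (a + 1) (b + 1) 1 = consec (a + 1) b := rfl

-- B's first guard is false on an undelivered box within range
theorem guard1_false {seen : PySem.Set Int} {n box : Int} (h1 : ¬ n < box) (h2 : box ∉ seen) :
    ¬ (n < box ∨ seen.contains box) := by
  rintro (h | h)
  · exact h1 h
  · exact h2 (contains_iff.1 h)

-- a true `any` over the window yields an unshipped container number in it
theorem exists_unseen_of_any {seen : PySem.Set Int} {box m : Int}
    (h : ((consec (box + 1) m).any fun v => !seen.contains v) = true) :
    ∃ v, box < v ∧ v ≤ m ∧ v ∉ seen := by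
  obtain ⟨v, hv, hp⟩ := List.any_eq_true.1 h
  have := consec_mem hv
  refine ⟨v, by omega, this.2, ?_⟩
  intro hmem
  rw [Bool.not_eq_eq_eq_not, Bool.not_true, ← Bool.not_eq_true, contains_iff] at hp
  exact hp hmem

-- a false `any` over the window means the whole window has been shipped
theorem allSeen_of_any_false {seen : PySem.Set Int} {box m : Int}
    (h : ((consec (box + 1) m).any fun v => !seen.contains v) = false) :
    ∀ w, box < w → w ≤ m → w ∈ seen := by
  intro w h1 h2
  have := List.any_eq_false.1 h w (consec_mem_iff.2 ⟨by omega, h2⟩)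
  simpa [contains_iff] using this

-- a nonempty tail of the abstract stack names an unshipped container number
theorem subOf_getLast {seen : PySem.Set Int} {m t : Int}
    (h : (subOf seen m).getLast? = some t) : 1 ≤ t ∧ t ≤ m ∧ t ∉ seen := by
  have hmem := List.mem_of_getLast? h
  obtain ⟨hc, hp⟩ := List.mem_filter.1 hmem
  have := consec_mem hc
  refine ⟨this.1, this.2, ?_⟩
  intro hx
  rw [Bool.not_eq_eq_eq_not, Bool.not_true, ← Bool.not_eq_true, contains_iff] at hp
  exact hp hx

-- an empty abstract stack means the whole window 1..m has been shipped
theorem subOf_nil_allSeen {seen : PySem.Set Int} {m : Int} (h : subOf seen m = []) :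
    ∀ v, 1 ≤ v → v ≤ m → v ∈ seen := by
  intro v h1 h2
  have := List.filter_eq_nil_iff.1 h v (consec_mem_iff.2 ⟨h1, h2⟩)
  simpa [PySem.Set.contains] using this

-- A breaks with `result` whenever the current box is a duplicate, beyond the container,
-- or buried under an unshipped container number
theorem a_dead_state {n m box r : Int} {seen : PySem.Set Int} (orders : List Int)
    (hmn : m ≤ n) (hseen : ∀ x ∈ seen, 1 ≤ x ∧ x ≤ m)
    (hcase : box ∈ seen ∨ n < box ∨
      (box ≤ m ∧ ((consec (box + 1) m).any fun v => !seen.contains v) = true)) :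
    aloop orders (consec (m + 1) n) (subOf seen m) box r = r := by
  rcases hcase with hdup | hbn | ⟨hbm, hany⟩
  · -- duplicate: box is shipped, so it is neither in the container nor on the stack
    refine a_dead orders (n + 1 - (m + 1)).toNat (m + 1) _ box r
      (Or.inl (by have := hseen box hdup; omega)) ?_ subOf_lt rfl
    rcases hl : (subOf seen m).getLast? with _ | t
    · exact Or.inl (List.getLast?_eq_none_iff.1 hl)
    · exact Or.inr (by intro he; exact (subOf_getLast hl).2.2 (Option.some.inj he ▸ hdup))
  · -- box beyond the container: everything gets pushed and the top stays below box
    refine a_dead orders (n + 1 - (m + 1)).toNat (m + 1) _ box r (Or.inr hbn) ?_ subOf_lt rfl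
    rcases hl : (subOf seen m).getLast? with _ | t
    · exact Or.inl (List.getLast?_eq_none_iff.1 hl)
    · exact Or.inr (by intro he
                       have := (subOf_getLast hl).2.1; have := Option.some.inj he; omega)
  · -- buried: an unshipped container number sits strictly above box
    by_cases hsub : subOf seen m = []
    · exact a_dead orders (n + 1 - (m + 1)).toNat (m + 1) _ box r (Or.inl (by omega))
        (Or.inl hsub) subOf_lt rfl
    · obtain ⟨v, hv1, hv2, hv3⟩ := exists_unseen_of_any hany
      obtain ⟨s, hs⟩ := List.exists_mem_of_ne_nil _ hsub
      obtain ⟨hsc, hsp⟩ := List.mem_filter.1 hs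
      have hsm := consec_mem hsc
      have hsns : s ∉ seen := by
        intro hx
        rw [Bool.not_eq_eq_eq_not, Bool.not_true, ← Bool.not_eq_true, contains_iff] at hsp
        exact hsp hx
      -- a witness strictly above box that is ≥ 1
      have hw : ∃ w, box < w ∧ w ≤ m ∧ 1 ≤ w ∧ w ∉ seen := by
        by_cases hb0 : 0 ≤ box
        · exact ⟨v, hv1, hv2, by omega, hv3⟩
        · exact ⟨s, by omega, hsm.2, hsm.1, hsns⟩
      obtain ⟨w, hw1, hw2, hw3, hw4⟩ := hw
      obtain ⟨t, ht1, ht2, ht3, ht4⟩ := max_unseen (m - box).toNat box m rfl ⟨w, hw1, hw2, hw4⟩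
      have htw : w ≤ t := by
        by_contra hlt
        exact hw4 (ht4 w (by omega) hw2)
      have hsplit := subOf_split (seen := seen) (by omega) ht2 ht3 ht4
      exact a_dead orders (n + 1 - (m + 1)).toNat (m + 1) _ box r (Or.inl (by omega))
        (Or.inr (by rw [hsplit, List.getLast?_concat]; intro he
                    have := Option.some.inj he; omega)) subOf_lt rfl

-- a box that tops the abstract stack is a positive container number
theorem box_pos_of_stack {seen : PySem.Set Int} {m box : Int}
    (hsub : subOf seen m ≠ []) (hAll : ∀ w, box < w → w ≤ m → w ∈ seen) : 1 ≤ box := by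
  obtain ⟨s, hs⟩ := List.exists_mem_of_ne_nil _ hsub
  obtain ⟨hsc, hsp⟩ := List.mem_filter.1 hs
  have hsm := consec_mem hsc
  have hsns : s ∉ seen := by
    intro hx
    rw [Bool.not_eq_eq_eq_not, Bool.not_true, ← Bool.not_eq_true, contains_iff] at hsp
    exact hsp hx
  by_contra hb
  exact hsns (hAll s (by omega) hsm.2)

-- at a state with an empty stack and an undelivered box not above m, the precondition fails:
-- the shipped prefix is a permutation of 1..m followed by that box
theorem pre_violation {m box : Int} {seen : PySem.Set Int} {done bs : List Int}
    (hm0 : 0 ≤ m) (hseen : ∀ x ∈ seen, 1 ≤ x ∧ x ≤ m) (hnd : done.Nodup)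
    (hmem : ∀ x, x ∈ seen ↔ x ∈ done) (hsub : subOf seen m = [])
    (hPre : ∀ (k : ℕ) (hk : k < (done ++ box :: bs).length),
      ((done ++ box :: bs).take k).Perm (PySem.List.pyRange 1 ((k : Int) + 1) 1) →
      (k : Int) < (done ++ box :: bs)[k]) :
    m < box := by
  have hall := subOf_nil_allSeen hsub
  have hperm : done.Perm (consec 1 m) := by
    unfold consec
    rw [List.perm_ext_iff_of_nodup hnd (PySem.List.nodup_pyRange_one 1 (m + 1))]
    intro a
    rw [← hmem, PySem.List.mem_pyRange_one]
    constructor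
    · exact fun h => by have := hseen a h; omega
    · exact fun h => hall a (by omega) (by omega)
  have hlen : (done.length : Int) = m := by
    have := hperm.length_eq
    unfold consec at this
    rw [PySem.List.length_pyRange_one] at this
    omega
  have hk : done.length < (done ++ box :: bs).length := by
    rw [List.length_append]; simp
  have htake : (done ++ box :: bs).take done.length = done := List.take_left
  have hget : (done ++ box :: bs)[done.length] = box := by
    rw [List.getElem_append_right (le_refl done.length)]
    simp
  have := hPre done.length hk (by rw [htake, hlen]; exact hperm)
  rw [hget, hlen] at this
  exact this

-- the main simulation: A's state (orders = bs ++ [n+1], container = [m+1..n], sub = subOf seen m)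
-- against B's (m, seen), currently processing `box`; `done` is the already-shipped prefix
theorem main_sim {n : Int} :
    ∀ (bs : List Int) (box m : Int) (seen : PySem.Set Int) (r : Int) (done : List Int),
    0 ≤ m → m ≤ n →
    (∀ x ∈ seen, 1 ≤ x ∧ x ≤ m) →
    done.Nodup →
    (∀ x, x ∈ seen ↔ x ∈ done) →
    (∀ (k : ℕ) (hk : k < (done ++ box :: bs).length),
      ((done ++ box :: bs).take k).Perm (PySem.List.pyRange 1 ((k : Int) + 1) 1) →
      (k : Int) < (done ++ box :: bs)[k]) →
    aloop (bs ++ [n + 1]) (consec (m + 1) n) (subOf seen m) box r = bloop (box :: bs) n m seen r := by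
  intro bs
  induction bs with
  | nil =>
    intro box m seen r done hm0 hmn hseen hnd hmem hPre
    simp only [List.nil_append]
    by_cases hdup : box ∈ seen
    · rw [a_dead_state _ hmn hseen (Or.inl hdup), bloop_cons,
          if_pos (Or.inr (contains_iff.2 hdup))]
    · by_cases hb_n : n < box
      · rw [a_dead_state _ hmn hseen (Or.inr (Or.inl hb_n)), bloop_cons,
            if_pos (Or.inl hb_n)]
      · by_cases hb_m : m < box
        · -- ship straight from the container, then the sentinel n+1 drains
          rw [a_push [n + 1] (box - (m + 1)).toNat (m + 1) (subOf seen m) box r (by omega)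
                (by omega) rfl,
              consec_cons (show box ≤ n by omega), aloop_ship]
          rw [show (match ([n + 1] : List Int) with
                | b' :: ot => aloop ot (consec (box + 1) n)
                    (subOf seen m ++ consec (m + 1) (box - 1)) b' (r + 1)
                | [] => r)
              = aloop [] (consec (box + 1) n)
                  (subOf seen m ++ consec (m + 1) (box - 1)) (n + 1) (r + 1) from rfl]
          have hlt : ∀ x ∈ subOf seen m ++ consec (m + 1) (box - 1), x < box + 1 :=
            lt_append_consec subOf_lt (by omega) (by omega)
          rw [a_dead [] (n + 1 - (box + 1)).toNat (box + 1) _ (n + 1) (r + 1) (Or.inr (by omega))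
                (top_ne hlt (by omega)) hlt rfl,
              bloop_cons, if_neg (guard1_false hb_n hdup), pyRange_eq_consec,
              if_neg (by rintro ⟨h, -⟩; omega)]
          rfl
        · have hbm : box ≤ m := by omega
          by_cases hany : ((consec (box + 1) m).any fun v => !seen.contains v) = true
          · rw [a_dead_state _ hmn hseen (Or.inr (Or.inr ⟨hbm, hany⟩)), bloop_cons,
                if_neg (guard1_false hb_n hdup), pyRange_eq_consec, if_pos ⟨hbm, hany⟩]
          · by_cases hsub : subOf seen m = []
            · exact absurd (pre_violation hm0 hseen hnd hmem hsub hPre) (by omega)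
            · -- on top of the abstract stack: ship from the stack, then the sentinel drains
              have hAll := allSeen_of_any_false (Bool.eq_false_iff.2 hany)
              have hbox1 : 1 ≤ box := box_pos_of_stack hsub hAll
              have hsplit := subOf_split (seen := seen) hbox1 hbm hdup hAll
              rw [a_subship (show box < m + 1 by omega)
                    (by rw [hsplit, List.getLast?_concat])]
              rw [show (match ([n + 1] : List Int) with
                    | b' :: ot => aloop ot (consec (m + 1) n) (subOf seen m).dropLast b' (r + 1)
                    | [] => r)
                  = aloop [] (consec (m + 1) n) (subOf seen m).dropLast (n + 1) (r + 1) from rfl]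
              have hdl : (subOf seen m).dropLast = subOf seen (box - 1) := by
                rw [hsplit, List.dropLast_concat]
              have hlt : ∀ x ∈ (subOf seen m).dropLast, x < m + 1 := by
                rw [hdl]; intro x hx; have := subOf_lt x hx; omega
              rw [a_dead [] (n + 1 - (m + 1)).toNat (m + 1) _ (n + 1) (r + 1) (Or.inr (by omega))
                    (top_ne hlt (by omega)) hlt rfl,
                  bloop_cons, if_neg (guard1_false hb_n hdup), pyRange_eq_consec,
                  if_neg (by rintro ⟨-, h⟩; exact hany h)]
              rfl
  | cons b' bs' ih =>
    intro box m seen r done hm0 hmn hseen hnd hmem hPre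
    by_cases hdup : box ∈ seen
    · rw [a_dead_state _ hmn hseen (Or.inl hdup), bloop_cons,
          if_pos (Or.inr (contains_iff.2 hdup))]
    · by_cases hb_n : n < box
      · rw [a_dead_state _ hmn hseen (Or.inr (Or.inl hb_n)), bloop_cons,
            if_pos (Or.inl hb_n)]
      · by_cases hb_m : m < box
        · -- ship straight from the container, then recurse
          rw [show (b' :: bs') ++ [n + 1] = b' :: (bs' ++ [n + 1]) from rfl,
              a_push _ (box - (m + 1)).toNat (m + 1) (subOf seen m) box r (by omega)
                (by omega) rfl,
              consec_cons (show box ≤ n by omega), aloop_ship]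
          rw [show (match (b' :: (bs' ++ [n + 1]) : List Int) with
                | b'' :: ot => aloop ot (consec (box + 1) n)
                    (subOf seen m ++ consec (m + 1) (box - 1)) b'' (r + 1)
                | [] => r)
              = aloop (bs' ++ [n + 1]) (consec (box + 1) n)
                  (subOf seen m ++ consec (m + 1) (box - 1)) b' (r + 1) from rfl]
          rw [← subOf_ship_container (by omega) hb_m hseen]
          conv_rhs => rw [bloop_cons]
          rw [if_neg (guard1_false hb_n hdup), pyRange_eq_consec,
              if_neg (by rintro ⟨h, -⟩; omega), max_eq_right (show m ≤ box by omega)]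
          exact ih b' box (seen.add box) (r + 1) (done ++ [box]) (by omega) (by omega)
                (fun x hx => by rcases (PySem.Set.mem_add seen box x).1 hx with h | h
                                · have := hseen x h; omega
                                · omega)
                (by rw [List.nodup_append]
                    refine ⟨hnd, List.nodup_singleton box, ?_⟩
                    intro a ha b hb he
                    rw [List.mem_singleton] at hb
                    subst hb
                    exact hdup ((hmem b).2 (he ▸ ha)))
                (fun x => by rw [PySem.Set.mem_add, List.mem_append, List.mem_singleton, hmem])
                (by simpa [List.append_assoc] using hPre)
        · have hbm : box ≤ m := by omega
          by_cases hany : ((consec (box + 1) m).any fun v => !seen.contains v) = true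
          · rw [a_dead_state _ hmn hseen (Or.inr (Or.inr ⟨hbm, hany⟩)), bloop_cons,
                if_neg (guard1_false hb_n hdup), pyRange_eq_consec, if_pos ⟨hbm, hany⟩]
          · by_cases hsub : subOf seen m = []
            · exact absurd (pre_violation hm0 hseen hnd hmem hsub hPre) (by omega)
            · -- ship from the stack, then recurse
              have hAll := allSeen_of_any_false (Bool.eq_false_iff.2 hany)
              have hbox1 : 1 ≤ box := box_pos_of_stack hsub hAll
              have hsplit := subOf_split (seen := seen) hbox1 hbm hdup hAll
              rw [show (b' :: bs') ++ [n + 1] = b' :: (bs' ++ [n + 1]) from rfl,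
                  a_subship (show box < m + 1 by omega)
                    (by rw [hsplit, List.getLast?_concat])]
              rw [show (match (b' :: (bs' ++ [n + 1]) : List Int) with
                    | b'' :: ot => aloop ot (consec (m + 1) n) (subOf seen m).dropLast b'' (r + 1)
                    | [] => r)
                  = aloop (bs' ++ [n + 1]) (consec (m + 1) n) (subOf seen m).dropLast b' (r + 1)
                  from rfl]
              have hdl : (subOf seen m).dropLast = subOf (seen.add box) m := by
                rw [hsplit, List.dropLast_concat, subOf_ship_stack hbox1 hbm hAll]
              rw [hdl]
              conv_rhs => rw [bloop_cons]
              rw [if_neg (guard1_false hb_n hdup), pyRange_eq_consec,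
                  if_neg (by rintro ⟨-, h⟩; exact hany h),
                  max_eq_left (show box ≤ m by omega)]
              exact ih b' m (seen.add box) (r + 1) (done ++ [box]) hm0 hmn
                    (fun x hx => by rcases (PySem.Set.mem_add seen box x).1 hx with h | h
                                    · exact hseen x h
                                    · omega)
                    (by rw [List.nodup_append]
                        refine ⟨hnd, List.nodup_singleton box, ?_⟩
                        intro a ha b hb he
                        rw [List.mem_singleton] at hb
                        subst hb
                        exact hdup ((hmem b).2 (he ▸ ha)))
                    (fun x => by rw [PySem.Set.mem_add, List.mem_append, List.mem_singleton, hmem])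
                    (by simpa [List.append_assoc] using hPre)

-- ===== VERDICT (by name: the statement is the Claim_ definition above) =====
theorem solution_spec : Claim_equal_solution := by
  intro order _ hpre
  unfold Pre_solution at hpre
  unfold Spec_solution
  rcases order with _ | ⟨b, rest⟩
  · exact absurd rfl hpre.1
  · show aloop (rest ++ [((b :: rest).length : Int) + 1]) (consec 1 ((b :: rest).length : Int)) [] b 0
        = solution_alt (b :: rest)
    have H := main_sim (n := ((b :: rest).length : Int)) rest b 0 PySem.Set.empty 0 []
      le_rfl (by simp; omega) (by simp [PySem.Set.empty]) List.nodup_nil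
      (by simp [PySem.Set.empty]) (by simpa using hpre.2)
    have e1 : (0 : Int) + 1 = 1 := by norm_num
    have e2 : subOf PySem.Set.empty 0 = [] := rfl
    rw [e1, e2] at H
    exact H.trans rfl
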